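-- pv_equiv track=rewrite | github.com/Rajesh1st/Hdby | main.py | select_preferred_link
-- ===== SOURCE A (Python) =====
-- from typing import List, Optional
--
-- def select_preferred_link(links: List[str]) -> Optional[str]:
--     """Return single preferred link:
--        Priority: hubcloud > hubdrive > hubcdn > first available"""
--     if not links:
--         return None
--     lower = [l.lower() for l in links]
--     for i, l in enumerate(lower):
--         if "hubcloud" in l:
--             return links[i]
--     for i, l in enumerate(lower):
--         if "hubdrive" in l:
--             return links[i]
--     for i, l in enumerate(lower):
--         if "hubcdn" in l:
--             return links[i]
--     # fallback
--     return links[0]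
-- ===== SOURCE B (Python) =====
-- from typing import List, Optional
--
-- def select_preferred_link(links: List[str]) -> Optional[str]:
--     """Single pass: return immediately on hubcloud, remember first hubdrive/hubcdn."""
--     if not links:
--         return None
--     first_hubdrive = None
--     first_hubcdn = None
--     for l in links:
--         ll = l.lower()
--         if "hubcloud" in ll:
--             return l
--         if "hubdrive" in ll and first_hubdrive is None:
--             first_hubdrive = l
--         if "hubcdn" in ll and first_hubcdn is None:
--             first_hubcdn = l
--     if first_hubdrive is not None:
--         return first_hubdrive
--     if first_hubcdn is not None:
--         return first_hubcdn
--     return links[0]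
-- ===== Notes on version B (the rewrite author's own statement) =====
-- stated objective: simpler
-- what changed: Replaces three sequential keyword scans over a precomputed lowered list with one pass that returns on hubcloud immediately and remembers the first hubdrive/hubcdn link.
import Mathlib
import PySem

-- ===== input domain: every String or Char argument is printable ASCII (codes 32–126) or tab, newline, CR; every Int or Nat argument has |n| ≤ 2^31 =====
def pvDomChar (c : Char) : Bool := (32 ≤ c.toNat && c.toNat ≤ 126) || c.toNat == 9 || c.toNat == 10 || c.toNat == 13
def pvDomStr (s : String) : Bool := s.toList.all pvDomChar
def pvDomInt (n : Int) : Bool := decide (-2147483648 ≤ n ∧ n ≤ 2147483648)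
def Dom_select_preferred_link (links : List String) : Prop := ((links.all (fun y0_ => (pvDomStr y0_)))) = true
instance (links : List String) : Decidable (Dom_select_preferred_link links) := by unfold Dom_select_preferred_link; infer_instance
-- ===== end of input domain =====

-- B replaces A's three sequential keyword scans with one pass that returns on
-- hubcloud immediately and remembers the first hubdrive/hubcdn link (simpler).

-- ===== PORT A =====
-- one `for i, l in enumerate(lower): if kw in l: return links[i]` scan, over (links[i], lower[i]) pairs
def pvScanA (kw : List Char) : List (String × List Char) → Option String
  | [] => none
  | (orig, l) :: rest => if PySem.Chars.isIn kw l then some orig else pvScanA kw rest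

def select_preferred_link (links : List String) : Option String :=
  if links = [] then none
  else
    let lower := links.map (fun l => PySem.Chars.lower l.toList)
    match pvScanA "hubcloud".toList (links.zip lower) with
    | some s => some s
    | none =>
      match pvScanA "hubdrive".toList (links.zip lower) with
      | some s => some s
      | none =>
        match pvScanA "hubcdn".toList (links.zip lower) with
        | some s => some s
        | none => links.head?

-- ===== PORT B =====
-- single for-loop: early return on hubcloud; carry first_hubdrive / first_hubcdn
def pvLoopB (fallback : String) : List String → Option String → Option String → Option String
  | [], fd, fc => some (((fd).orElse (fun _ => fc)).getD fallback)
  | l :: rest, fd, fc =>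
    let ll := PySem.Chars.lower l.toList
    if PySem.Chars.isIn "hubcloud".toList ll then some l
    else
      pvLoopB fallback rest
        (if PySem.Chars.isIn "hubdrive".toList ll && fd.isNone then some l else fd)
        (if PySem.Chars.isIn "hubcdn".toList ll && fc.isNone then some l else fc)

def select_preferred_link_alt (links : List String) : Option String :=
  match links with
  | [] => none
  | h :: _ => pvLoopB h links none none

-- ===== PRECONDITION & SPEC =====
def Spec_select_preferred_link (links : List String) (out : Option String) : Prop := out = select_preferred_link_alt links
instance (links : List String) (out : Option String) : Decidable (Spec_select_preferred_link links out) := by unfold Spec_select_preferred_link; infer_instance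

-- ===== CLAIM (what is proved, stated in full; the proofs are below) =====
def Claim_equal_select_preferred_link : Prop := ∀ (links : List String), Dom_select_preferred_link links → Spec_select_preferred_link links (select_preferred_link links)

-- ===== LEMMAS AND PROOFS =====

-- a scan over the zipped (link, lowered) pairs, as a function of the raw list
def pvScan (kw : List Char) (ls : List String) : Option String :=
  pvScanA kw (ls.zip (ls.map (fun l => PySem.Chars.lower l.toList)))

theorem pvScan_nil (kw : List Char) : pvScan kw [] = none := rfl

theorem pvScan_cons (kw : List Char) (l : String) (rest : List String) :
    pvScan kw (l :: rest) =
      if PySem.Chars.isIn kw (PySem.Chars.lower l.toList) then some l else pvScan kw rest := rfl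

-- B's loop, characterised by A's three scans
theorem pvLoopB_eq (fb : String) (ls : List String) (fd fc : Option String) :
    pvLoopB fb ls fd fc =
      match pvScan "hubcloud".toList ls with
      | some s => some s
      | none =>
        some (((fd.orElse (fun _ => pvScan "hubdrive".toList ls)).orElse
               (fun _ => fc.orElse (fun _ => pvScan "hubcdn".toList ls))).getD fb) := by
  induction ls generalizing fd fc with
  | nil => cases fd <;> cases fc <;> simp [pvLoopB, pvScan_nil, Option.orElse]
  | cons l rest ih =>
    simp only [pvLoopB, pvScan_cons, ih]
    split_ifs with hc hd he hd he <;> try rfl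
    all_goals
      cases pvScan "hubcloud".toList rest <;> try rfl
    all_goals
      cases fd <;> cases fc <;>
        simp_all [Option.orElse, Option.isNone]

-- ===== VERDICT (by name: the statement is the Claim_ definition above) =====
theorem select_preferred_link_spec : Claim_equal_select_preferred_link := by
  intro links _
  unfold Spec_select_preferred_link
  cases links with
  | nil => rfl
  | cons h t =>
    show select_preferred_link (h :: t) = pvLoopB h (h :: t) none none
    rw [pvLoopB_eq]
    show (match pvScan "hubcloud".toList (h :: t) with
      | some s => some s
      | none =>
        match pvScan "hubdrive".toList (h :: t) with
        | some s => some s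
        | none =>
          match pvScan "hubcdn".toList (h :: t) with
          | some s => some s
          | none => (h :: t).head?) = _
    cases pvScan "hubcloud".toList (h :: t) with
    | some s => rfl
    | none =>
      cases pvScan "hubdrive".toList (h :: t) <;>
        cases pvScan "hubcdn".toList (h :: t) <;> simp [Option.orElse]
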